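-- pv_equiv track=rewrite | github.com/HenriqueVarellaEhrenfried/Text_Representation | Dep-Generator/GraphRepresentation.py | order_only
-- ===== SOURCE A (Python) =====
-- def order_only(sentence):
--     ## This method uses only the order of the word
--     token_number = 0
--     num_tokens = len(sentence)
--     token_index = 0
--     result = []
--
--     for token in sentence:
--         NEIGHBORS = ""
--         if token_index < (num_tokens):
--             if token_index + 1 != num_tokens:
--                 NEIGHBORS = NEIGHBORS + str(token_index+1)
--         token_index +=1
--         token_number +=1
--         result.append(NEIGHBORS)
--     return result
-- ===== SOURCE B (Python) =====
-- def order_only(sentence):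
--     # Build the labels back-to-front: count down from the last inner index,
--     # collecting str(i) for i = n-1 .. 1, then reverse and close with ''.
--     if not sentence:
--         return []
--     labels = []
--     i = len(sentence) - 1
--     while i > 0:
--         labels.append(str(i))
--         i -= 1
--     labels.reverse()
--     labels.append('')
--     return labels
-- ===== Notes on version B (the rewrite author's own statement) =====
-- stated objective: alternative
-- what changed: Instead of A's forward pass over the tokens with a counter and nested conditionals, B never iterates over the tokens at all: it counts DOWN from the last inner index collecting labels in reverse, then reverses the list and appends the trailing empty label.
import Mathlib
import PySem

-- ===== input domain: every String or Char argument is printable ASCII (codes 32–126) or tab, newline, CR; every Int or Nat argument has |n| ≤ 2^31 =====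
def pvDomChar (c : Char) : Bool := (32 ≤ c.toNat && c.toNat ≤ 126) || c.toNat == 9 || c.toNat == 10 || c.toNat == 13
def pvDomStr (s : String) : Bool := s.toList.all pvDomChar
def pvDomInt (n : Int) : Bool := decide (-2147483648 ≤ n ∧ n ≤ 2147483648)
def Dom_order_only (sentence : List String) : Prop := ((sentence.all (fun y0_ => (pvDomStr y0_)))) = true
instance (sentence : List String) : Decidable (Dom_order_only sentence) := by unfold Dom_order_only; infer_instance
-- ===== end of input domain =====

-- B builds the labels back-to-front: it counts down from the last inner index collecting str(i), reverses, and appends the trailing empty label (alternative decomposition, same O(n)).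


-- ===== PORT A =====
-- loop of A: carries num_tokens and token_index; token_number is unused, kept as carried state
def order_only_go (num_tokens : Int) (token_index : Int) (token_number : Int) (rest : List String) : List String :=
  match rest with
  | [] => []
  | _ :: ts =>
    let NEIGHBORS :=
      if token_index < num_tokens then
        (if token_index + 1 ≠ num_tokens then "" ++ PySem.Int.toStr (token_index + 1) else "")
      else ""
    NEIGHBORS :: order_only_go num_tokens (token_index + 1) (token_number + 1) ts

def order_only (sentence : List String) : List String :=
  order_only_go (sentence.length : Int) 0 0 sentence

-- ===== PORT B =====
-- B's while-loop: i counts down from len-1 to 1, appending str(i) each turn (fuel = i)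
def order_only_alt_go : Nat → List String → List String
  | 0, labels => labels
  | Nat.succ j, labels => order_only_alt_go j (labels ++ [PySem.Int.toStr ((j : Int) + 1)])

def order_only_alt (sentence : List String) : List String :=
  if sentence = [] then []
  else (order_only_alt_go (sentence.length - 1) []).reverse ++ [""]

-- ===== PRECONDITION & SPEC =====
def Spec_order_only (sentence : List String) (out : List String) : Prop := out = order_only_alt sentence
instance (sentence : List String) (out : List String) : Decidable (Spec_order_only sentence out) := by unfold Spec_order_only; infer_instance

-- ===== CLAIM (what is proved, stated in full; the proofs are below) =====
def Claim_equal_order_only : Prop := ∀ (sentence : List String), Dom_order_only sentence → Spec_order_only sentence (order_only sentence)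

-- ===== LEMMAS AND PROOFS =====

-- A's loop yields the labels str(i+1), …, str(n-1) followed by "" (for nonempty rest)
lemma order_only_go_eq (rest : List String) : ∀ (i t : Int) (n : Int), i + rest.length = n →
    order_only_go n i t rest =
      (List.range (rest.length - 1)).map (fun (k : Nat) => PySem.Int.toStr (i + 1 + (k : Int))) ++
        (if rest = [] then [] else [""]) := by
  induction rest with
  | nil => intro i t n _; simp [order_only_go]
  | cons x ts ih =>
    intro i t n h
    simp only [List.length_cons] at h
    have hlt : i < n := by omega
    by_cases hlast : i + 1 = n
    · have hts : ts = [] := by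
        have : (ts.length : Int) = 0 := by omega
        simpa using this
      subst hts
      simp [order_only_go, hlt, hlast]
    · have hts : ts ≠ [] := by
        intro hc; subst hc; simp at h; omega
      have hpos : 0 < ts.length := List.length_pos_iff.mpr hts
      have hrange : List.range (ts.length + 1 - 1) = List.range ((ts.length - 1) + 1) := by
        congr 1; omega
      simp only [List.length_cons]
      rw [hrange, List.range_succ_eq_map]
      simp only [order_only_go]
      rw [if_pos hlt, if_pos hlast, ih (i + 1) (t + 1) n (by omega), if_neg hts]
      simp only [List.map_cons, List.map_map, List.cons_append]
      congr 1
      · simp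
      · rw [if_neg (by simp : ¬ (x :: ts : List String) = [])]
        congr 1
        apply List.map_congr_left
        intro a _
        simp only [Function.comp]
        congr 1
        push_cast
        ring

-- B's countdown loop appends str(j), …, str(1) after labels
lemma order_only_alt_go_eq (j : Nat) : ∀ (labels : List String),
    order_only_alt_go j labels =
      labels ++ (List.range j).reverse.map (fun (k : Nat) => PySem.Int.toStr ((k : Int) + 1)) := by
  induction j with
  | zero => intro labels; simp [order_only_alt_go]
  | succ m ih =>
    intro labels
    rw [order_only_alt_go, ih, List.range_succ]
    simp

-- ===== VERDICT (by name: the statement is the Claim_ definition above) =====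
theorem order_only_spec : Claim_equal_order_only := by
  intro sentence _
  unfold Spec_order_only order_only order_only_alt
  cases sentence with
  | nil => simp [order_only_go]
  | cons x ts =>
    rw [order_only_go_eq (x :: ts) 0 0 _ (by simp), order_only_alt_go_eq]
    simp only [List.length_cons, List.nil_append, List.map_reverse, List.reverse_reverse]
    have hne : (x :: ts : List String) ≠ [] := by simp
    simp [hne]
    intro k _
    congr 1
    ring
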